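-- pv_equiv track=rewrite | github.com/adirz/sample-projects | samle projects/school projects/intro to CS/ex5/GetToTheZero.py | a_path_is_possible
-- ===== SOURCE A (Python) =====
-- def a_path_is_possible(start,board):
--     """
--     a rucurrsive way to solve 'is_solvable', goes through the board
--     and check any possible way
--     """
--     if start < 0 or start >= len(board):
--         return False
--     if board[start] < 0:
--         return False
--     if board[start] == 0:
--         return True
--     board[start] = -board[start]
--     return a_path_is_possible(start + board[start],board) or\
--            a_path_is_possible(start - board[start],board)
-- ===== SOURCE B (Python) =====
-- def a_path_is_possible(start, board):
--     """Iterative DFS with an explicit stack instead of recursion.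
--
--     Performs the same negation marking of visited cells as the recursive
--     version, in the same left-first preorder.
--     """
--     stack = [start]
--     while stack:
--         cell = stack.pop()
--         if cell < 0 or cell >= len(board):
--             continue
--         v = board[cell]
--         if v < 0:
--             continue
--         if v == 0:
--             return True
--         board[cell] = -v
--         stack.append(cell + v)
--         stack.append(cell - v)
--     return False
-- ===== Notes on version B (the rewrite author's own statement) =====
-- stated objective: alternative
-- what changed: Replaced the recursive DFS (Python call stack, or-short-circuit) by an iterative DFS over an explicit stack list with a while loop, pushing the two jump targets so the left child is popped first.
import Mathlib
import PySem

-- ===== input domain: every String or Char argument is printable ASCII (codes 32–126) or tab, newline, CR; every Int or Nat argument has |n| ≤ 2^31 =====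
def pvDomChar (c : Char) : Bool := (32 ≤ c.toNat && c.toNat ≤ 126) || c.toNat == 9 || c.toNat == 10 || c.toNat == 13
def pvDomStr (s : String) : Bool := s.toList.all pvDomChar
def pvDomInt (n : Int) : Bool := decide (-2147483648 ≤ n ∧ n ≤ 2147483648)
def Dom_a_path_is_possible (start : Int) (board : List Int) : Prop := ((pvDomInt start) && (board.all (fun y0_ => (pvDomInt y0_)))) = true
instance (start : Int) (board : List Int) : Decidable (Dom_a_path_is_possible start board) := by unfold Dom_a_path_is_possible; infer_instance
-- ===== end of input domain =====

-- B replaces A's recursive DFS by an iterative explicit-stack DFS (same return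
-- value; B also performs the same in-place negation of visited cells as A,
-- though only the return value is proved equal here).


-- ===== PORT A =====
-- number of positive cells: each recursive step of A negates one, so it
-- strictly decreases; 'posc board + 1' units of fuel therefore always suffice
-- (proved below), making the fuel-indexed transliteration total.
def posc (b : List Int) : Nat := b.countP (fun x => decide (0 < x))

-- one fuel unit per call of Python A; the state is (start, board) exactly as in A
def goA : Nat → Int → List Int → Bool × List Int
  | 0, _, b => (false, b)
  | fuel+1, s, b =>
    if s < 0 ∨ s ≥ (b.length : Int) then (false, b)
    else
      match PySem.List.pyGet? b s with
      | none => (false, b)          -- unreachable: the range guard above ensures the index is valid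
      | some v =>
        if v < 0 then (false, b)
        else if v = 0 then (true, b)
        else
          -- board[start] = -board[start]; then the children use the NEGATED value
          let b' := b.set s.toNat (-v)
          let r1 := goA fuel (s + (-v)) b'
          if r1.1 then (true, r1.2) else goA fuel (s - (-v)) r1.2

def a_path_is_possible (start : Int) (board : List Int) : Bool :=
  (goA (posc board + 1) start board).1

-- ===== PORT B =====
-- one fuel unit per iteration of B's while loop; stack head = top of B's list
-- (B pushes cell+v then cell-v, so cell-v is on top); fuel
-- '2*posc board + |stack| + 1' suffices (each iteration drops the measure
-- 2*posc + |stack| by at least one; proved below).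
def goB : Nat → List Int → List Int → Bool
  | _, [], _ => false
  | 0, _ :: _, _ => false
  | fuel+1, cell :: rest, b =>
    if cell < 0 ∨ cell ≥ (b.length : Int) then goB fuel rest b
    else
      match PySem.List.pyGet? b cell with
      | none => goB fuel rest b     -- unreachable: range guard
      | some v =>
        if v < 0 then goB fuel rest b
        else if v = 0 then true
        else goB fuel ((cell - v) :: (cell + v) :: rest) (b.set cell.toNat (-v))

def a_path_is_possible_alt (start : Int) (board : List Int) : Bool :=
  goB (2 * posc board + 2) [start] board

-- ===== PRECONDITION & SPEC =====
def Spec_a_path_is_possible (start : Int) (board : List Int) (out : Bool) : Prop := out = a_path_is_possible_alt start board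
instance (start : Int) (board : List Int) (out : Bool) : Decidable (Spec_a_path_is_possible start board out) := by unfold Spec_a_path_is_possible; infer_instance

-- ===== CLAIM (what is proved, stated in full; the proofs are below) =====
def Claim_equal_a_path_is_possible : Prop := ∀ (start : Int) (board : List Int), Dom_a_path_is_possible start board → Spec_a_path_is_possible start board (a_path_is_possible start board)

-- ===== LEMMAS AND PROOFS =====

-- negating a positive cell removes exactly one positive entry
theorem posc_set (b : List Int) (i : Nat) (v : Int)
    (hget : b[i]? = some v) (hv : 0 < v) :
    posc (b.set i (-v)) + 1 = posc b := by
  induction b generalizing i with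
  | nil => simp at hget
  | cons x xs ih =>
    cases i with
    | zero =>
      have hx : x = v := by simpa using hget
      subst hx
      simp only [List.set_cons_zero, posc, List.countP_cons, decide_eq_true_eq]
      split_ifs <;> omega
    | succ n =>
      simp at hget
      have := ih n hget
      simp [posc, List.countP_cons] at this ⊢
      omega

-- goA never increases the number of positive cells
theorem posc_goA (fuel : Nat) (s : Int) (b : List Int) :
    posc (goA fuel s b).2 ≤ posc b := by
  induction fuel generalizing s b with
  | zero => simp [goA]
  | succ f ih =>
    simp only [goA]
    split
    · simp
    · split
      · simp
      · rename_i hrange v hget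
        split
        · simp
        · split
          · simp
          · have hv : 0 < v := by omega
            have h0s : 0 ≤ s := by omega
            rw [PySem.List.pyGet?_of_nonneg b h0s] at hget
            have hset := posc_set b s.toNat v hget hv
            split
            · rename_i h
              calc posc (goA f (s + -v) (b.set s.toNat (-v))).2
                  ≤ posc (b.set s.toNat (-v)) := ih _ _
                _ ≤ posc b := by omega
            · calc posc (goA f (s - -v) (goA f (s + -v) (b.set s.toNat (-v))).2).2
                  ≤ posc (goA f (s + -v) (b.set s.toNat (-v))).2 := ih _ _
                _ ≤ posc (b.set s.toNat (-v)) := ih _ _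
                _ ≤ posc b := by omega

-- fuel irrelevance: any fuel above posc b gives the same result
theorem goA_fuel (fuel fuel' : Nat) (s : Int) (b : List Int)
    (h : posc b < fuel) (h' : posc b < fuel') :
    goA fuel s b = goA fuel' s b := by
  induction fuel generalizing fuel' s b with
  | zero => omega
  | succ f ih =>
    cases fuel' with
    | zero => omega
    | succ f' =>
      simp only [goA]
      split
      · rfl
      · split
        · rfl
        · rename_i hrange v hget
          split
          · rfl
          · split
            · rfl
            · have hv : 0 < v := by omega
              have h0s : 0 ≤ s := by omega
              rw [PySem.List.pyGet?_of_nonneg b h0s] at hget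
              have hset := posc_set b s.toNat v hget hv
              have hb' : posc (b.set s.toNat (-v)) < f := by omega
              have hb'' : posc (b.set s.toNat (-v)) < f' := by omega
              have e1 : goA f (s + -v) (b.set s.toNat (-v)) = goA f' (s + -v) (b.set s.toNat (-v)) :=
                ih _ _ _ hb' hb''
              rw [e1]
              have hle := posc_goA f' (s + -v) (b.set s.toNat (-v))
              split
              · rfl
              · exact ih _ _ _ (by omega) (by omega)

-- bridge: popping one stack cell in B performs one full recursive call of A
theorem goB_goA (p : Nat) : ∀ (b : List Int), posc b = p → ∀ (s : Int) (rest : List Int),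
    goB (2 * p + rest.length + 2) (s :: rest) b =
      (if (goA (p + 1) s b).1 then true
       else goB (2 * posc (goA (p + 1) s b).2 + rest.length + 1) rest (goA (p + 1) s b).2) := by
  induction p using Nat.strong_induction_on with
  | _ p ih =>
    intro b hb s rest
    have hfuel : 2 * p + rest.length + 2 = (2 * p + rest.length + 1) + 1 := by omega
    rw [hfuel]
    conv_lhs => rw [goB]
    simp only [goA]
    split
    · simp [hb]
    · split
      · simp [hb]
      · rename_i hrange v hget
        split
        · simp [hb]
        · split
          · simp
          · have hv : 0 < v := by omega
            have h0s : 0 ≤ s := by omega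
            have hget' : b[s.toNat]? = some v := by
              rw [PySem.List.pyGet?_of_nonneg b h0s] at hget; exact hget
            have hset := posc_set b s.toNat v hget' hv
            have hp1 : 1 ≤ p := by omega
            set b' := b.set s.toNat (-v) with hb'
            have hpb' : posc b' = p - 1 := by omega
            -- first child: (s - v) on top of stack ((s + v) :: rest)
            have e1 := ih (p - 1) (by omega) b' hpb' (s - v) ((s + v) :: rest)
            have hlen : 2 * (p - 1) + ((s + v) :: rest).length + 2 = 2 * p + rest.length + 1 := by
              simp; omega
            rw [hlen] at e1
            rw [e1]
            have hsv : s - v = s + -v := by ring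
            have hp1' : p - 1 + 1 = p := by omega
            rw [hsv, hp1']
            set r1 := goA p (s + -v) b' with hr1
            have hr1le : posc r1.2 ≤ p - 1 := le_trans (posc_goA p (s + -v) b') (le_of_eq hpb')
            by_cases h1 : r1.1 = true
            · simp [h1]
            · simp only [Bool.not_eq_true] at h1
              -- second child
              have e2 := ih (posc r1.2) (by omega) r1.2 rfl (s + v) rest
              have e3 : goA (posc r1.2 + 1) (s + v) r1.2 = goA p (s + v) r1.2 :=
                goA_fuel _ _ _ _ (by omega) (by omega)
              rw [e3] at e2
              have hsv2 : s - -v = s + v := by ring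
              simp only [h1, Bool.false_eq_true, if_false, hsv2, List.length_cons]
              rw [show 2 * posc r1.2 + (rest.length + 1) + 1 = 2 * posc r1.2 + rest.length + 2 from by omega]
              rw [e2]

-- ===== VERDICT (by name: the statement is the Claim_ definition above) =====
theorem a_path_is_possible_spec : Claim_equal_a_path_is_possible := by
  intro start board _
  unfold Spec_a_path_is_possible a_path_is_possible a_path_is_possible_alt
  have h := goB_goA (posc board) board rfl start []
  simp only [List.length_nil] at h
  have hfuel : 2 * posc board + 0 + 2 = 2 * posc board + 2 := by omega
  rw [hfuel] at h
  rw [h]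
  cases hres : (goA (posc board + 1) start board).1 <;> simp [goB]
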